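-- pv_equiv track=rewrite | github.com/airtnqls/Shapez2-Analytics-tools | regex_score copy.py | calculate_specificity_score
-- ===== SOURCE A (Python) =====
-- def calculate_specificity_score(pattern_string: str) -> int:
--     """정규식 패턴의 구조적 구체성 점수를 계산합니다."""
--     # (이전과 동일한 함수)
--     score = 0
--     i = 0
--     while i < len(pattern_string):
--         char = pattern_string[i]
--         if char == '[':
--             end_bracket_index = pattern_string.find(']', i)
--             if end_bracket_index != -1:
--                 score += (2 if pattern_string[i+1] == '^' else 3)
--                 i = end_bracket_index
--         elif char == '.': score += 1
--         elif char != ':': score += 4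
--         i += 1
--     return score
-- ===== SOURCE B (Python) =====
-- def _token_score(token):
--     if len(token) > 1:  # a complete bracket class '[...]'
--         return 2 if token[1] == '^' else 3
--     return {'.': 1, ':': 0, '[': 0}.get(token, 4)
--
--
-- def calculate_specificity_score(pattern_string: str) -> int:
--     # Tokenize once: each token is a complete bracket class or a single char.
--     tokens = []
--     rest = pattern_string
--     while rest:
--         if rest[0] == '[':
--             j = rest.find(']')
--             if j != -1:
--                 tokens.append(rest[:j + 1])
--                 rest = rest[j + 1:]
--                 continue
--         tokens.append(rest[0])
--         rest = rest[1:]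
--     return sum(_token_score(t) for t in tokens)
-- ===== Notes on version B (the rewrite author's own statement) =====
-- stated objective: simpler
-- what changed: A interleaves scoring with a manual index-jumping while loop; B first tokenizes the pattern into complete bracket classes or single characters and then sums a uniform per-token score table.
import Mathlib
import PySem

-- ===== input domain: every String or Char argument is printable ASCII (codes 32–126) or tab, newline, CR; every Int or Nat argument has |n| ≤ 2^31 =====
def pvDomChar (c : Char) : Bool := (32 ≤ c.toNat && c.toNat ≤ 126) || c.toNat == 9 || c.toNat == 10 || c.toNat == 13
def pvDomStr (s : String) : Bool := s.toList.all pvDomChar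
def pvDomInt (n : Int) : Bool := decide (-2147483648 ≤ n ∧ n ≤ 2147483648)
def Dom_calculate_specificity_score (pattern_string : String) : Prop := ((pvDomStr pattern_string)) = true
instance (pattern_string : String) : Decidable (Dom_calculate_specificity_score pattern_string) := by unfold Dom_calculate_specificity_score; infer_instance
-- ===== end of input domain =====

-- B tokenizes the pattern once (bracket classes or single chars) and sums a per-token
-- score table, instead of A's interleaved index-jumping scan; objective: simpler/idiomatic.

-- B tokenizes the pattern once (complete bracket classes or single chars) and sums a
-- per-token score table, instead of A's interleaved index-jumping scan; objective: simpler.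

-- ===== PORT A =====
-- A's while loop over index i, written as recursion on the remaining suffix:
-- pattern_string[i] is the head; find(']', i) is findIdx? on the tail (the head '[' is never ']').
def pvALoop : List Char → Int → Int
  | [], score => score
  | c :: rest, score =>
    if c = '[' then
      match List.findIdx? (fun x => x = ']') rest with
      | some j => pvALoop (rest.drop (j + 1)) (score + (if rest.head? = some '^' then 2 else 3))
      | none => pvALoop rest score
    else if c = '.' then pvALoop rest (score + 1)
    else if c = ':' then pvALoop rest score
    else pvALoop rest (score + 4)
termination_by cs _ => cs.length
decreasing_by all_goals simp [List.length_drop]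

def calculate_specificity_score (pattern_string : String) : Int :=
  pvALoop pattern_string.toList 0

-- ===== PORT B =====
def pvTokenScore (token : List Char) : Int :=
  if token.length > 1 then
    (match token with
     | _ :: c :: _ => if c = '^' then 2 else 3
     | _ => 3)
  else match token with
    | ['.'] => 1
    | [':'] => 0
    | ['['] => 0
    | _ => 4

def pvTokens : List Char → List (List Char)
  | [] => []
  | c :: rest =>
    if c = '[' then
      match List.findIdx? (fun x => x = ']') rest with
      | some j => ('[' :: rest.take (j + 1)) :: pvTokens (rest.drop (j + 1))
      | none => [c] :: pvTokens rest
    else [c] :: pvTokens rest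
termination_by cs => cs.length
decreasing_by all_goals simp [List.length_drop]

def calculate_specificity_score_alt (pattern_string : String) : Int :=
  ((pvTokens pattern_string.toList).map pvTokenScore).sum

-- ===== PRECONDITION & SPEC =====
def Spec_calculate_specificity_score (pattern_string : String) (out : Int) : Prop := out = calculate_specificity_score_alt pattern_string
instance (pattern_string : String) (out : Int) : Decidable (Spec_calculate_specificity_score pattern_string out) := by unfold Spec_calculate_specificity_score; infer_instance

-- ===== CLAIM (what is proved, stated in full; the proofs are below) =====
def Claim_equal_calculate_specificity_score : Prop := ∀ (pattern_string : String), Dom_calculate_specificity_score pattern_string → Spec_calculate_specificity_score pattern_string (calculate_specificity_score pattern_string)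

-- ===== LEMMAS AND PROOFS =====
theorem pvALoop_eq_sum (cs : List Char) (score : Int) :
    pvALoop cs score = score + ((pvTokens cs).map pvTokenScore).sum := by
  induction cs, score using pvALoop.induct with
  | case1 score => simp [pvALoop, pvTokens]
  | case2 rest score j hj ih =>
    obtain ⟨r0, rest', rfl⟩ : ∃ r0 rest', rest = r0 :: rest' := by
      cases rest with
      | nil => simp at hj
      | cons a l => exact ⟨a, l, rfl⟩
    simp only [dite_eq_ite] at ih
    rw [pvALoop, pvTokens]
    simp only [hj, if_true]
    by_cases h : r0 = '^' <;>
      simp [pvTokenScore, h] at ih ⊢ <;> linear_combination ih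
  | case3 rest score hnone ih =>
    rw [pvALoop, pvTokens]
    simp [hnone, ih, pvTokenScore]
  | case4 rest score h ih =>
    rw [pvALoop, pvTokens]
    simp [ih, pvTokenScore]
    ring
  | case5 rest score h1 h2 ih =>
    rw [pvALoop, pvTokens]
    simp [ih, pvTokenScore]
  | case6 c rest score hc hdot hcolon ih =>
    rw [pvALoop, pvTokens]
    have ht : pvTokenScore [c] = 4 := by
      simp only [pvTokenScore]
      split
      · simp_all
      · split <;> simp_all
    simp [hc, hdot, hcolon, ih, ht]
    ring

-- ===== VERDICT (by name: the statement is the Claim_ definition above) =====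
theorem calculate_specificity_score_spec : Claim_equal_calculate_specificity_score := by
  intro p _
  unfold Spec_calculate_specificity_score calculate_specificity_score calculate_specificity_score_alt
  rw [pvALoop_eq_sum]
  ring
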